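-- pv_equiv track=rewrite | github.com/Mercurius360/radiostationeditor | radio_editor.py | _find_trailing_brace_tail_start
-- ===== SOURCE A (Python) =====
-- def _find_trailing_brace_tail_start(lines: list[str]) -> int:
--     """Keep closing braces at the bottom by inserting new station lines before brace-tail."""
--     i = len(lines)
--     while i > 0:
--         t = lines[i - 1].strip()
--         if t == "" or t == "}":
--             i -= 1
--             continue
--         break
--     return i
-- ===== SOURCE B (Python) =====
-- def _find_trailing_brace_tail_start(lines: list[str]) -> int:
--     """One full forward pass: 1 + last index whose stripped line is real, default 0."""
--     return max((i + 1 for i, l in enumerate(lines) if l.strip() not in ("", "}")), default=0)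
-- ===== Notes on version B (the rewrite author's own statement) =====
-- stated objective: simpler
-- what changed: Replaces the stateful backward early-stop cursor with a single forward enumerate pass taking max(i+1) over indices of non-blank/non-'}' lines, default 0.
import Mathlib
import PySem

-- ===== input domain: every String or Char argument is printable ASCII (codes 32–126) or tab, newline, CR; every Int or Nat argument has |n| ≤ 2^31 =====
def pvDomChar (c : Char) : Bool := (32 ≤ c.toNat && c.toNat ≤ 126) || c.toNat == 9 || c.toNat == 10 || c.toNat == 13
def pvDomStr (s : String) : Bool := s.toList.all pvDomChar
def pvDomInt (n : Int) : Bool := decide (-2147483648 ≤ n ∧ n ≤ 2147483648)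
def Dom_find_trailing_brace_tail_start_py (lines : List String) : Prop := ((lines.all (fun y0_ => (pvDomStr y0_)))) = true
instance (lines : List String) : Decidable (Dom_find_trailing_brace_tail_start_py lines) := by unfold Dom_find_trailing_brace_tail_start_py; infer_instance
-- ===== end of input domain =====

-- B replaces A's backward early-stop cursor by one forward pass taking max(i+1) over
-- indices of non-blank/non-'}' lines (default 0); objective: simpler.

-- ===== PORT A =====
-- A's while-loop, counting the cursor i down from len(lines); lines[i-1] is in range
-- whenever the loop body runs, so getD's default is never consulted.
def pvALoop (lines : List String) : Nat → Int
  | 0 => 0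
  | i + 1 =>
    let t := PySem.Str.strip (lines.getD i "")
    if t == "" || t == "}" then pvALoop lines i else ((i : Int) + 1)

def find_trailing_brace_tail_start_py (lines : List String) : Int :=
  pvALoop lines lines.length

-- ===== PORT B =====
-- max((i+1 for i, l in enumerate(lines) if l.strip() not in ("", "}")), default=0)
def find_trailing_brace_tail_start_py_alt (lines : List String) : Int :=
  (PySem.List.enumerate lines).foldl
    (fun acc p =>
      if !(PySem.Str.strip p.2 == "" || PySem.Str.strip p.2 == "}") then max acc (p.1 + 1)
      else acc) 0

-- ===== PRECONDITION & SPEC =====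
def Spec_find_trailing_brace_tail_start_py (lines : List String) (out : Int) : Prop := out = find_trailing_brace_tail_start_py_alt lines
instance (lines : List String) (out : Int) : Decidable (Spec_find_trailing_brace_tail_start_py lines out) := by unfold Spec_find_trailing_brace_tail_start_py; infer_instance

-- ===== CLAIM (what is proved, stated in full; the proofs are below) =====
def Claim_equal_find_trailing_brace_tail_start_py : Prop := ∀ (lines : List String), Dom_find_trailing_brace_tail_start_py lines → Spec_find_trailing_brace_tail_start_py lines (find_trailing_brace_tail_start_py lines)

-- ===== LEMMAS AND PROOFS =====

-- B's fold step, named for the proofs below.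
def pvBStep (acc : Int) (p : Int × String) : Int :=
  if !(PySem.Str.strip p.2 == "" || PySem.Str.strip p.2 == "}") then max acc (p.1 + 1) else acc

theorem pvAlt_eq_fold (lines : List String) :
    find_trailing_brace_tail_start_py_alt lines =
      (PySem.List.enumerate lines).foldl pvBStep 0 := rfl

-- The fold never exceeds the next index position.
theorem pvBfold_le (xs : List String) : ∀ (s acc : Int), acc ≤ s →
    (PySem.List.enumerate xs s).foldl pvBStep acc ≤ s + xs.length := by
  induction xs with
  | nil =>
    intro s acc h
    simp only [PySem.List.enumerate_nil, List.foldl_nil, List.length_nil]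
    omega
  | cons x xs ih =>
    intro s acc h
    rw [PySem.List.enumerate_cons, List.foldl_cons]
    have h1 : pvBStep acc (s, x) ≤ s + 1 := by
      unfold pvBStep; split <;> omega
    have := ih (s + 1) (pvBStep acc (s, x)) h1
    simp only [List.length_cons]
    push_cast
    omega

theorem pvBfold_take_succ (lines : List String) (n : Nat) (hn : n < lines.length) :
    (PySem.List.enumerate (lines.take (n + 1))).foldl pvBStep 0 =
      pvBStep ((PySem.List.enumerate (lines.take n)).foldl pvBStep 0) ((n : Int), lines[n]) := by
  have htake : lines.take (n + 1) = lines.take n ++ [lines[n]] := by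
    rw [List.take_add_one]
    simp [List.getElem?_eq_getElem hn]
  rw [htake, PySem.List.enumerate_append, List.foldl_append]
  simp [PySem.List.enumerate_cons, PySem.List.enumerate_nil,
    List.length_take, Nat.min_eq_left (Nat.le_of_lt hn)]

theorem pvBStep_skip (acc i : Int) (x : String)
    (h : (PySem.Str.strip x == "" || PySem.Str.strip x == "}") = true) :
    pvBStep acc (i, x) = acc := by
  simp only [pvBStep]
  rw [h]
  simp

theorem pvBStep_keep (acc i : Int) (x : String)
    (h : (PySem.Str.strip x == "" || PySem.Str.strip x == "}") = false) :
    pvBStep acc (i, x) = max acc (i + 1) := by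
  simp only [pvBStep]
  rw [h]
  simp

theorem pvALoop_eq_fold (lines : List String) : ∀ (n : Nat), n ≤ lines.length →
    pvALoop lines n = (PySem.List.enumerate (lines.take n)).foldl pvBStep 0 := by
  intro n
  induction n with
  | zero => intro _; simp [pvALoop, PySem.List.enumerate_nil]
  | succ n ih =>
    intro h
    have hn : n < lines.length := Nat.lt_of_succ_le h
    have hget : lines.getD n "" = lines[n] := List.getD_eq_getElem lines "" hn
    have hA : pvALoop lines (n + 1) =
        if (PySem.Str.strip (lines.getD n "") == "" || PySem.Str.strip (lines.getD n "") == "}")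
        then pvALoop lines n else ((n : Int) + 1) := rfl
    rw [pvBfold_take_succ lines n hn]
    have hle : (PySem.List.enumerate (lines.take n)).foldl pvBStep 0 ≤ (n : Int) := by
      have := pvBfold_le (lines.take n) 0 0 le_rfl
      simpa [List.length_take, Nat.min_eq_left (Nat.le_of_lt hn)] using this
    cases hb : (PySem.Str.strip lines[n] == "" || PySem.Str.strip lines[n] == "}") with
    | true =>
      rw [pvBStep_skip _ _ _ hb, hA, hget, hb]
      simpa using ih (Nat.le_of_lt hn)
    | false =>
      rw [pvBStep_keep _ _ _ hb, hA, hget, hb]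
      simp
      omega

-- ===== VERDICT (by name: the statement is the Claim_ definition above) =====
theorem find_trailing_brace_tail_start_py_spec : Claim_equal_find_trailing_brace_tail_start_py := by
  intro lines _
  unfold Spec_find_trailing_brace_tail_start_py find_trailing_brace_tail_start_py
  rw [pvAlt_eq_fold]
  have := pvALoop_eq_fold lines lines.length le_rfl
  simpa [List.take_length] using this
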